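-- pv_equiv track=rewrite | github.com/wuxiyang1996/Video_Skills | patches/006_2048_gameai_backport/twentyFortyEightEnv.py | _corner_proximity
-- ===== SOURCE A (Python) =====
-- def _corner_proximity(board_vals: list) -> str:
--     max_val = 0
--     max_pos = (0, 0)
--     for r in range(len(board_vals)):
--         for c in range(len(board_vals[r])):
--             if board_vals[r][c] > max_val:
--                 max_val = board_vals[r][c]
--                 max_pos = (r, c)
--     corners = {
--         (0, 0): "top-left", (0, 3): "top-right",
--         (3, 0): "bottom-left", (3, 3): "bottom-right",
--     }
--     best = min(corners, key=lambda c: abs(c[0] - max_pos[0]) + abs(c[1] - max_pos[1]))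
--     return corners[best]
-- ===== SOURCE B (Python) =====
-- def _corner_proximity(board_vals: list) -> str:
--     # flatten once, keep only values that beat the initial max of 0;
--     # max(..., key=...) returns the FIRST maximal cell, matching the strict-> scan
--     cells = [(v, r, c)
--              for r, row in enumerate(board_vals)
--              for c, v in enumerate(row)
--              if v > 0]
--     _v, r, c = max(cells, key=lambda t: t[0]) if cells else (0, 0, 0)
--     # corners sit at rows/cols 0 and 3, so the nearest corner decomposes
--     # into an independent row half and column half (integer positions never tie)
--     vert = "top" if r <= 1 else "bottom"
--     horiz = "left" if c <= 1 else "right"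
--     return f"{vert}-{horiz}"
-- ===== Notes on version B (the rewrite author's own statement) =====
-- stated objective: simpler
-- what changed: replaces the nested index loops and the corners-dict min(key=Manhattan) argmin with a single flatten-filter pass, a library max(key=value) for the first maximal cell, and a closed-form threshold decision (row<=1 -> top, col<=1 -> left).
import Mathlib
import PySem

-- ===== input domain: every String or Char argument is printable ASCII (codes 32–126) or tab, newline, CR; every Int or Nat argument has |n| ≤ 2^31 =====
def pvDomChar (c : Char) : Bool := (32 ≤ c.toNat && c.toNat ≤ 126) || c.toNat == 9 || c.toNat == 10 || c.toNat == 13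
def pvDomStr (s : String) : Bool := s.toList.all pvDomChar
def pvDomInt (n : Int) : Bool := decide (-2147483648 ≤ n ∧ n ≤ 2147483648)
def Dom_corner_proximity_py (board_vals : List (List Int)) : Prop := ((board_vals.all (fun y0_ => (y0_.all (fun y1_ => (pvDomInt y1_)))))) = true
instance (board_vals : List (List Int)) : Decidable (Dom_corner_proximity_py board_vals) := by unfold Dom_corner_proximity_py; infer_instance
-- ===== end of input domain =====

-- B replaces the nested index loops + corners-dict argmin by one flatten-filter-max pass
-- and a closed-form threshold decision (row ≤ 1 → top, col ≤ 1 → left): simpler, same cost.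

-- ===== PORT A =====
-- literal transliteration of A: index loops over range(len(..)), strict '>' running max
-- starting at 0 / (0,0), then min over the corner dict's keys by Manhattan distance.
def corner_proximity_py (board_vals : List (List Int)) : String :=
  let st : Int × Int × Int :=
    (PySem.List.pyRange 0 (board_vals.length : Int) 1).foldl (fun st r =>
      let row := PySem.List.pyGetD board_vals r []
      (PySem.List.pyRange 0 (row.length : Int) 1).foldl (fun st c =>
        if PySem.List.pyGetD row c 0 > st.1 then (PySem.List.pyGetD row c 0, r, c) else st) st)
      (0, 0, 0)
  let corners : PySem.Dict (Int × Int) String :=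
    PySem.Dict.ofList [(((0:Int), (0:Int)), "top-left"), ((0, 3), "top-right"),
                       ((3, 0), "bottom-left"), ((3, 3), "bottom-right")]
  match PySem.List.min? corners.keys (fun p => |p.1 - st.2.1| + |p.2 - st.2.2|) with
  | some best => (corners.get? best).getD ""   -- corners[best]; the key is always present
  | none => ""                                  -- unreachable: corners is nonempty

-- ===== PORT B =====
-- literal transliteration of B: flatten-and-filter comprehension, max(key=t[0]) with the
-- empty-list conditional, then the two threshold tests.
def corner_proximity_py_alt (board_vals : List (List Int)) : String :=
  let cells : List (Int × Int × Int) :=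
    (PySem.List.enumerate board_vals).flatMap (fun rrow =>
      (PySem.List.enumerate rrow.2).filterMap (fun cv =>
        if cv.2 > 0 then some (cv.2, rrow.1, cv.1) else none))
  let t := (PySem.List.max? cells (fun t => t.1)).getD (0, 0, 0)
  let vert := if t.2.1 ≤ 1 then "top" else "bottom"
  let horiz := if t.2.2 ≤ 1 then "left" else "right"
  vert ++ "-" ++ horiz

-- ===== PRECONDITION & SPEC =====
def Spec_corner_proximity_py (board_vals : List (List Int)) (out : String) : Prop := out = corner_proximity_py_alt board_vals
instance (board_vals : List (List Int)) (out : String) : Decidable (Spec_corner_proximity_py board_vals out) := by unfold Spec_corner_proximity_py; infer_instance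

-- ===== CLAIM (what is proved, stated in full; the proofs are below) =====
def Claim_equal_corner_proximity_py : Prop := ∀ (board_vals : List (List Int)), Dom_corner_proximity_py board_vals → Spec_corner_proximity_py board_vals (corner_proximity_py board_vals)

-- ===== LEMMAS AND PROOFS =====

-- A's running-max step on (value, row, col) triples.
def pvStep (st t : Int × Int × Int) : Int × Int × Int := if t.1 > st.1 then t else st

-- all cells of the board as (value, row, col), row-major.
def pvCells (board_vals : List (List Int)) : List (Int × Int × Int) :=
  (PySem.List.enumerate board_vals).flatMap (fun p =>
    (PySem.List.enumerate p.2).map (fun q => (q.2, p.1, q.1)))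

-- 'for i in range(len(xs)): … xs[i] …' as a fold over enumerate xs.
lemma foldl_range_eq_enumerate {α β : Type} (xs : List α) (d : α) (F : β → Int → α → β) (init : β) :
    (PySem.List.pyRange 0 (xs.length : Int) 1).foldl (fun st j => F st j (PySem.List.pyGetD xs j d)) init
      = (PySem.List.enumerate xs).foldl (fun st p => F st p.1 p.2) init := by
  have h := PySem.List.enumerate_eq_map_pyRange xs d
  rw [PySem.List.len_eq] at h
  rw [h, List.foldl_map]

-- A's nested loops compute the pvStep-fold over the flattened cell list.
lemma a_fold_eq_cells (board_vals : List (List Int)) :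
    (PySem.List.pyRange 0 (board_vals.length : Int) 1).foldl (fun st r =>
        (PySem.List.pyRange 0 ((PySem.List.pyGetD board_vals r []).length : Int) 1).foldl (fun st c =>
          if PySem.List.pyGetD (PySem.List.pyGetD board_vals r []) c 0 > st.1 then
            (PySem.List.pyGetD (PySem.List.pyGetD board_vals r []) c 0, r, c) else st) st)
      ((0 : Int), (0 : Int), (0 : Int))
      = (pvCells board_vals).foldl pvStep (0, 0, 0) := by
  have h1 := foldl_range_eq_enumerate board_vals ([] : List Int)
    (fun st r row =>
      (PySem.List.pyRange 0 (row.length : Int) 1).foldl (fun st c =>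
        if PySem.List.pyGetD row c 0 > st.1 then (PySem.List.pyGetD row c 0, r, c) else st) st)
    ((0 : Int), (0 : Int), (0 : Int))
  refine h1.trans ?_
  have h2 : ∀ (st : Int × Int × Int) (p : Int × List Int),
      (PySem.List.pyRange 0 (p.2.length : Int) 1).foldl (fun st c =>
        if PySem.List.pyGetD p.2 c 0 > st.1 then (PySem.List.pyGetD p.2 c 0, p.1, c) else st) st
      = (PySem.List.enumerate p.2).foldl (fun st q =>
          if q.2 > st.1 then (q.2, p.1, q.1) else st) st := by
    intro st p
    exact foldl_range_eq_enumerate p.2 0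
      (fun st c v => if v > st.1 then (v, p.1, c) else st) st
  calc (PySem.List.enumerate board_vals).foldl (fun st p =>
          (PySem.List.pyRange 0 (p.2.length : Int) 1).foldl (fun st c =>
            if PySem.List.pyGetD p.2 c 0 > st.1 then (PySem.List.pyGetD p.2 c 0, p.1, c) else st) st)
        ((0 : Int), (0 : Int), (0 : Int))
      = (PySem.List.enumerate board_vals).foldl (fun st p =>
          (PySem.List.enumerate p.2).foldl (fun st q =>
            if q.2 > st.1 then (q.2, p.1, q.1) else st) st) ((0 : Int), (0 : Int), (0 : Int)) := by
        simp only [h2]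
    _ = (pvCells board_vals).foldl pvStep (0, 0, 0) := by
        unfold pvCells
        rw [List.foldl_flatMap]
        simp only [List.foldl_map, pvStep]

-- per row, the filtered comprehension is a filter of the mapped cells.
lemma filterMap_pos (l : List (Int × Int)) (r : Int) :
    l.filterMap (fun cv => if cv.2 > 0 then some (cv.2, r, cv.1) else none)
      = (l.map (fun q => (q.2, r, q.1))).filter (fun t => 0 < t.1) := by
  induction l with
  | nil => rfl
  | cons a l ih =>
    by_cases h : 0 < a.2 <;>
      simp [h, ih]

-- B's comprehension is the positive-value filter of the flattened cell list.
lemma b_cells_eq_filter (board_vals : List (List Int)) :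
    (PySem.List.enumerate board_vals).flatMap (fun rrow =>
        (PySem.List.enumerate rrow.2).filterMap (fun cv =>
          if cv.2 > 0 then some (cv.2, rrow.1, cv.1) else none))
      = (pvCells board_vals).filter (fun t => 0 < t.1) := by
  unfold pvCells
  rw [List.filter_flatMap]
  simp only [filterMap_pos]

-- elements with non-positive value never move a positive running max.
lemma foldl_step_filter (L : List (Int × Int × Int)) (s : Int × Int × Int) (hs : 0 < s.1) :
    L.foldl pvStep s = (L.filter (fun t => 0 < t.1)).foldl pvStep s := by
  induction L generalizing s with
  | nil => rfl
  | cons a L ih =>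
    simp only [List.foldl_cons, List.filter_cons]
    by_cases h : 0 < a.1
    · rw [if_pos (by simpa using h), List.foldl_cons]
      exact ih (pvStep s a) (by unfold pvStep; split_ifs <;> omega)
    · have hstep : pvStep s a = s := by unfold pvStep; rw [if_neg (by omega)]
      rw [hstep, if_neg (by simpa using h)]
      exact ih s hs

-- folding max?'s step from 'some m' is the pvStep fold from m.
lemma max?_foldl_some (L : List (Int × Int × Int)) (m : Int × Int × Int) :
    L.foldl (fun acc x => match acc with
      | none => some x
      | some m => if m.1 < x.1 then some x else some m) (some m)
      = some (L.foldl pvStep m) := by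
  induction L generalizing m with
  | nil => rfl
  | cons a L ih =>
    simp only [List.foldl_cons]
    show L.foldl _ (if m.1 < a.1 then some a else some m) = some (L.foldl pvStep (pvStep m a))
    by_cases h : m.1 < a.1
    · rw [if_pos h, ih a]
      have : pvStep m a = a := by unfold pvStep; exact if_pos h
      rw [this]
    · rw [if_neg h, ih m]
      have : pvStep m a = m := by unfold pvStep; exact if_neg h
      rw [this]

-- A's running max from (0,0,0) = Python max over the positive cells, default (0,0,0).
lemma fold_eq_max? (L : List (Int × Int × Int)) :
    L.foldl pvStep ((0 : Int), (0 : Int), (0 : Int))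
      = (PySem.List.max? (L.filter (fun t => 0 < t.1)) (fun t => t.1)).getD (0, 0, 0) := by
  induction L with
  | nil => rfl
  | cons a L ih =>
    simp only [List.foldl_cons, List.filter_cons]
    by_cases h : 0 < a.1
    · rw [if_pos (by simpa using h)]
      have h0 : pvStep (0, 0, 0) a = a := by unfold pvStep; exact if_pos h
      have hmax : PySem.List.max? (a :: L.filter (fun t => 0 < t.1)) (fun t => t.1)
          = some ((L.filter (fun t => 0 < t.1)).foldl pvStep a) := by
        unfold PySem.List.max?
        rw [List.foldl_cons]
        refine Eq.trans ?_ (max?_foldl_some (L.filter (fun t => 0 < t.1)) a)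
        congr 1
        all_goals first
          | rfl
          | (funext acc x; cases acc <;> rfl)
      rw [h0, hmax, Option.getD_some]
      exact foldl_step_filter L a h
    · have h0 : pvStep (0, 0, 0) a = (0, 0, 0) := by unfold pvStep; exact if_neg h
      rw [if_neg (by simpa using h), h0]
      exact ih

-- positions produced by the fold are nonnegative.
lemma fold_pos_nonneg (L : List (Int × Int × Int)) (s : Int × Int × Int)
    (hL : ∀ t ∈ L, 0 ≤ t.2.1 ∧ 0 ≤ t.2.2) (h1 : 0 ≤ s.2.1) (h2 : 0 ≤ s.2.2) :
    0 ≤ (L.foldl pvStep s).2.1 ∧ 0 ≤ (L.foldl pvStep s).2.2 := by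
  induction L generalizing s with
  | nil => exact ⟨h1, h2⟩
  | cons a L ih =>
    simp only [List.foldl_cons]
    have ha := hL a (by simp)
    refine ih (pvStep s a) (fun t ht => hL t (by simp [ht])) ?_ ?_
    · unfold pvStep; split_ifs; exacts [ha.1, h1]
    · unfold pvStep; split_ifs; exacts [ha.2, h2]

lemma cells_pos_nonneg (board_vals : List (List Int)) :
    ∀ t ∈ pvCells board_vals, 0 ≤ t.2.1 ∧ 0 ≤ t.2.2 := by
  intro t ht
  unfold pvCells at ht
  rw [List.mem_flatMap] at ht
  obtain ⟨p, hp, ht⟩ := ht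
  rw [List.mem_map] at ht
  obtain ⟨q, hq, rfl⟩ := ht
  rw [PySem.List.mem_enumerate_iff] at hp hq
  obtain ⟨k, hk, rfl⟩ := hp
  obtain ⟨k', hk', rfl⟩ := hq
  exact ⟨by simp, by simp⟩

-- the corner argmin in closed form, for nonnegative positions.
def pvKey (r c : Int) (p : Int × Int) : Int := |p.1 - r| + |p.2 - c|
def pvMin2 (r c : Int) (mm x : Int × Int) : Int × Int :=
  if pvKey r c x < pvKey r c mm then x else mm

-- min(xs, key) on a nonempty list is a running-min fold from the head.
lemma min?_cons_foldl {A K : Type} [LT K] [DecidableLT K] (L : List A) (m : A) (key : A → K) :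
    PySem.List.min? (m :: L) key
      = some (L.foldl (fun mm x => if key x < key mm then x else mm) m) := by
  suffices h : ∀ (L : List A) (m : A), L.foldl (fun acc x => match acc with
      | none => some x
      | some mm => if key x < key mm then some x else some mm) (some m)
      = some (L.foldl (fun mm x => if key x < key mm then x else mm) m) by
    unfold PySem.List.min?
    rw [List.foldl_cons]
    refine Eq.trans ?_ (h L m)
    congr 1
  intro L
  induction L with
  | nil => intro m; rfl
  | cons a L ih =>
    intro m
    simp only [List.foldl_cons]
    show L.foldl _ (if key a < key m then some a else some m)
      = some (L.foldl _ (if key a < key m then a else m))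
    by_cases hh : key a < key m
    · rw [if_pos hh, if_pos hh, ih a]
    · rw [if_neg hh, if_neg hh, ih m]

lemma min?_corners (r c : Int) (hr : 0 ≤ r) (hc : 0 ≤ c) :
    PySem.List.min? [(((0:Int)), ((0:Int))), ((0:Int), (3:Int)), ((3:Int), (0:Int)), ((3:Int), (3:Int))]
        (fun p => |p.1 - r| + |p.2 - c|)
      = some (if r ≤ 1 then 0 else 3, if c ≤ 1 then 0 else 3) := by
  have e1 : |(0:Int) - r| = r := by rw [zero_sub, abs_neg, abs_of_nonneg hr]
  have e2 : |(0:Int) - c| = c := by rw [zero_sub, abs_neg, abs_of_nonneg hc]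
  rw [show (fun p : Int × Int => |p.1 - r| + |p.2 - c|) = pvKey r c from rfl]
  rw [min?_cons_foldl]
  rw [show (fun mm x : Int × Int => if pvKey r c x < pvKey r c mm then x else mm)
        = pvMin2 r c from rfl]
  rw [List.foldl_cons, List.foldl_cons, List.foldl_cons, List.foldl_nil]
  by_cases hr1 : r ≤ 1 <;> by_cases hc1 : c ≤ 1
  · -- top-left
    have s1 : pvMin2 r c (0, 0) (0, 3) = (0, 0) := by
      unfold pvMin2 pvKey
      rcases abs_cases ((3:Int) - r) with ⟨g, g'⟩ | ⟨g, g'⟩ <;>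
        rcases abs_cases ((3:Int) - c) with ⟨h, h'⟩ | ⟨h, h'⟩ <;>
          simp only [e1, e2, g, h] <;> split_ifs <;>
            first | rfl | omega | (exfalso; omega)
    have s2 : pvMin2 r c (0, 0) (3, 0) = (0, 0) := by
      unfold pvMin2 pvKey
      rcases abs_cases ((3:Int) - r) with ⟨g, g'⟩ | ⟨g, g'⟩ <;>
        rcases abs_cases ((3:Int) - c) with ⟨h, h'⟩ | ⟨h, h'⟩ <;>
          simp only [e1, e2, g, h] <;> split_ifs <;>
            first | rfl | omega | (exfalso; omega)
    have s3 : pvMin2 r c (0, 0) (3, 3) = (0, 0) := by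
      unfold pvMin2 pvKey
      rcases abs_cases ((3:Int) - r) with ⟨g, g'⟩ | ⟨g, g'⟩ <;>
        rcases abs_cases ((3:Int) - c) with ⟨h, h'⟩ | ⟨h, h'⟩ <;>
          simp only [e1, e2, g, h] <;> split_ifs <;>
            first | rfl | omega | (exfalso; omega)
    rw [s1, s2, s3, if_pos hr1, if_pos hc1]
  · -- top-right
    have s1 : pvMin2 r c (0, 0) (0, 3) = (0, 3) := by
      unfold pvMin2 pvKey
      rcases abs_cases ((3:Int) - r) with ⟨g, g'⟩ | ⟨g, g'⟩ <;>
        rcases abs_cases ((3:Int) - c) with ⟨h, h'⟩ | ⟨h, h'⟩ <;>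
          simp only [e1, e2, g, h] <;> split_ifs <;>
            first | rfl | omega | (exfalso; omega)
    have s2 : pvMin2 r c (0, 3) (3, 0) = (0, 3) := by
      unfold pvMin2 pvKey
      rcases abs_cases ((3:Int) - r) with ⟨g, g'⟩ | ⟨g, g'⟩ <;>
        rcases abs_cases ((3:Int) - c) with ⟨h, h'⟩ | ⟨h, h'⟩ <;>
          simp only [e1, e2, g, h] <;> split_ifs <;>
            first | rfl | omega | (exfalso; omega)
    have s3 : pvMin2 r c (0, 3) (3, 3) = (0, 3) := by
      unfold pvMin2 pvKey
      rcases abs_cases ((3:Int) - r) with ⟨g, g'⟩ | ⟨g, g'⟩ <;>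
        rcases abs_cases ((3:Int) - c) with ⟨h, h'⟩ | ⟨h, h'⟩ <;>
          simp only [e1, e2, g, h] <;> split_ifs <;>
            first | rfl | omega | (exfalso; omega)
    rw [s1, s2, s3, if_pos hr1, if_neg hc1]
  · -- bottom-left
    have s1 : pvMin2 r c (0, 0) (0, 3) = (0, 0) := by
      unfold pvMin2 pvKey
      rcases abs_cases ((3:Int) - r) with ⟨g, g'⟩ | ⟨g, g'⟩ <;>
        rcases abs_cases ((3:Int) - c) with ⟨h, h'⟩ | ⟨h, h'⟩ <;>
          simp only [e1, e2, g, h] <;> split_ifs <;>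
            first | rfl | omega | (exfalso; omega)
    have s2 : pvMin2 r c (0, 0) (3, 0) = (3, 0) := by
      unfold pvMin2 pvKey
      rcases abs_cases ((3:Int) - r) with ⟨g, g'⟩ | ⟨g, g'⟩ <;>
        rcases abs_cases ((3:Int) - c) with ⟨h, h'⟩ | ⟨h, h'⟩ <;>
          simp only [e1, e2, g, h] <;> split_ifs <;>
            first | rfl | omega | (exfalso; omega)
    have s3 : pvMin2 r c (3, 0) (3, 3) = (3, 0) := by
      unfold pvMin2 pvKey
      rcases abs_cases ((3:Int) - r) with ⟨g, g'⟩ | ⟨g, g'⟩ <;>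
        rcases abs_cases ((3:Int) - c) with ⟨h, h'⟩ | ⟨h, h'⟩ <;>
          simp only [e1, e2, g, h] <;> split_ifs <;>
            first | rfl | omega | (exfalso; omega)
    rw [s1, s2, s3, if_neg hr1, if_pos hc1]
  · -- bottom-right (the second step can go either way; the third always wins)
    have s1 : pvMin2 r c (0, 0) (0, 3) = (0, 3) := by
      unfold pvMin2 pvKey
      rcases abs_cases ((3:Int) - r) with ⟨g, g'⟩ | ⟨g, g'⟩ <;>
        rcases abs_cases ((3:Int) - c) with ⟨h, h'⟩ | ⟨h, h'⟩ <;>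
          simp only [e1, e2, g, h] <;> split_ifs <;>
            first | rfl | omega | (exfalso; omega)
    have s2 : pvMin2 r c (0, 3) (3, 0) = (0, 3) ∨ pvMin2 r c (0, 3) (3, 0) = (3, 0) := by
      unfold pvMin2
      split_ifs <;> simp
    have s3 : ∀ m : Int × Int, m = (0, 3) ∨ m = (3, 0) → pvMin2 r c m (3, 3) = (3, 3) := by
      rintro m (rfl | rfl) <;>
        · unfold pvMin2 pvKey
          rcases abs_cases ((3:Int) - r) with ⟨g, g'⟩ | ⟨g, g'⟩ <;>
            rcases abs_cases ((3:Int) - c) with ⟨h, h'⟩ | ⟨h, h'⟩ <;>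
              simp only [e1, e2, g, h] <;> split_ifs <;>
                first | rfl | omega | (exfalso; omega)
    rw [s1]
    rcases s2 with s2 | s2 <;> rw [s2, s3 _ (by simp [s2])] <;>
      rw [if_neg hr1, if_neg hc1]

-- ===== VERDICT (by name: the statement is the Claim_ definition above) =====
theorem corner_proximity_py_spec : Claim_equal_corner_proximity_py := by
  intro board_vals _
  unfold Spec_corner_proximity_py corner_proximity_py corner_proximity_py_alt
  dsimp only
  rw [a_fold_eq_cells, b_cells_eq_filter, ← fold_eq_max?]
  have hnn := fold_pos_nonneg (pvCells board_vals) (0, 0, 0) (cells_pos_nonneg board_vals)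
    (by norm_num) (by norm_num)
  set st := (pvCells board_vals).foldl pvStep ((0:Int), (0:Int), (0:Int)) with hst
  have hkeys : (PySem.Dict.ofList [(((0:Int), (0:Int)), "top-left"), ((0, 3), "top-right"),
      ((3, 0), "bottom-left"), ((3, 3), "bottom-right")]).keys
      = [(((0:Int)), ((0:Int))), ((0:Int), (3:Int)), ((3:Int), (0:Int)), ((3:Int), (3:Int))] := by decide
  rw [hkeys, min?_corners st.2.1 st.2.2 hnn.1 hnn.2]
  by_cases h1 : st.2.1 ≤ 1 <;> by_cases h2 : st.2.2 ≤ 1 <;> simp only [h1, h2, if_pos] <;> decide
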